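-- pv_equiv track=rewrite | github.com/yuckylot/Fedotova | Olimp/razved.py | razv
-- ===== SOURCE A (Python) =====
-- import math
--
-- def razv(n):
--     if n ==3:
--         return 1
--     if n < 3:
--         return 0
--     else:
--         even = math.floor(n/2)
--         odd = math.floor(n/2)+(n%2)
--         return razv(even)+razv(odd)
-- ===== SOURCE B (Python) =====
-- def razv(n):
--     if n == 3:
--         return 1
--     if n < 3:
--         return 0
--     # p copies of value k and q copies of value k+1 cover one level of A's halving tree
--     k, p, q = n, 1, 0
--     while k > 3:
--         if k % 2 == 0:
--             p = 2 * p + q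
--         else:
--             q = p + 2 * q
--         k //= 2
--     return p if k == 3 else q
-- ===== Notes on version B (the rewrite author's own statement) =====
-- stated objective: faster
-- what changed: Replaced A's exponentially branching recursion (one call per node of the halving tree, O(n) calls) by a single O(log n) loop that tracks the at most two distinct values k and k+1 present at each tree level together with their multiplicities.
import Mathlib
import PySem

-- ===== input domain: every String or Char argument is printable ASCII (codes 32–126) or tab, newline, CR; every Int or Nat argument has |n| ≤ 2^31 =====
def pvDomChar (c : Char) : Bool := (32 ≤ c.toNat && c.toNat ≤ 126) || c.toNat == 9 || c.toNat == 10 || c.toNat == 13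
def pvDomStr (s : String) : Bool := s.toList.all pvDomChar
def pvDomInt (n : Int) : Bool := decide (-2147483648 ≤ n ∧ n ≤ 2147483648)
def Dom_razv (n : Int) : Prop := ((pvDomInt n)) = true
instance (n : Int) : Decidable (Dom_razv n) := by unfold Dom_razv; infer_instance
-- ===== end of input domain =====

-- B replaces A's O(n) recursion tree by an O(log n) loop that carries the (at most two)
-- distinct values of each tree level with their multiplicities.

-- ===== PORT A =====
-- math.floor(n/2) equals floor integer division exactly on Dom (|n| ≤ 2^31 < 2^53)
def razv (n : Int) : Int :=
  if n = 3 then 1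
  else if n < 3 then 0
  else
    razv (PySem.Int.floordiv n 2) + razv (PySem.Int.floordiv n 2 + PySem.Int.mod n 2)
termination_by n.toNat
decreasing_by
  all_goals
    have h1 : PySem.Int.floordiv n 2 = n / 2 := PySem.Int.floordiv_eq_ediv_of_pos (by omega)
    have h2 : PySem.Int.mod n 2 = n % 2 := PySem.Int.mod_eq_emod_of_pos (by omega)
    omega

-- ===== PORT B =====
-- the while loop of Source B: p copies of value k, q copies of value k+1
def razvAltLoop (k p q : Int) : Int :=
  if 3 < k then
    if PySem.Int.mod k 2 = 0 then razvAltLoop (PySem.Int.floordiv k 2) (2 * p + q) q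
    else razvAltLoop (PySem.Int.floordiv k 2) p (p + 2 * q)
  else if k = 3 then p else q
termination_by k.toNat
decreasing_by
  all_goals
    have h1 : PySem.Int.floordiv k 2 = k / 2 := PySem.Int.floordiv_eq_ediv_of_pos (by omega)
    omega

def razv_alt (n : Int) : Int :=
  if n = 3 then 1
  else if n < 3 then 0
  else razvAltLoop n 1 0

-- ===== PRECONDITION & SPEC =====
def Spec_razv (n : Int) (out : Int) : Prop := out = razv_alt n
instance (n : Int) (out : Int) : Decidable (Spec_razv n out) := by unfold Spec_razv; infer_instance

-- ===== CLAIM (what is proved, stated in full; the proofs are below) =====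
def Claim_equal_razv : Prop := ∀ (n : Int), Dom_razv n → Spec_razv n (razv n)

-- ===== LEMMAS AND PROOFS =====

theorem razv_base (n : Int) (h : n < 3) : razv n = 0 := by
  rw [razv]; rw [if_neg (by omega), if_pos h]

theorem razv_three : razv 3 = 1 := by rw [razv]; simp

theorem razv_even (m : Int) (h : 1 < m) : razv (2 * m) = razv m + razv m := by
  rw [razv]
  rw [if_neg (by omega), if_neg (by omega)]
  have h1 : PySem.Int.floordiv (2 * m) 2 = m := by
    rw [PySem.Int.floordiv_eq_ediv_of_pos (by omega)]; omega
  have h2 : PySem.Int.mod (2 * m) 2 = 0 := by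
    rw [PySem.Int.mod_eq_emod_of_pos (by omega)]; omega
  rw [h1, h2, add_zero]

theorem razv_odd (m : Int) (h : 1 < m) : razv (2 * m + 1) = razv m + razv (m + 1) := by
  rw [razv]
  rw [if_neg (by omega), if_neg (by omega)]
  have h1 : PySem.Int.floordiv (2 * m + 1) 2 = m := by
    rw [PySem.Int.floordiv_eq_ediv_of_pos (by omega)]; omega
  have h2 : PySem.Int.mod (2 * m + 1) 2 = 1 := by
    rw [PySem.Int.mod_eq_emod_of_pos (by omega)]; omega
  rw [h1, h2]

theorem razv_four : razv 4 = 0 := by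
  rw [show (4 : Int) = 2 * 2 by norm_num, razv_even 2 (by norm_num)]
  rw [razv_base 2 (by norm_num)]; norm_num

theorem razvAltLoop_stop2 (p q : Int) : razvAltLoop 2 p q = q := by
  rw [razvAltLoop]; norm_num

theorem razvAltLoop_stop3 (p q : Int) : razvAltLoop 3 p q = p := by
  rw [razvAltLoop]; norm_num

theorem loop_eq (k p q : Int) (hk : 3 < k) :
    razvAltLoop k p q = p * razv k + q * razv (k + 1) := by
  rw [razvAltLoop, if_pos hk]
  have hmd : PySem.Int.mod k 2 = k % 2 := PySem.Int.mod_eq_emod_of_pos (by omega)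
  have hfd : PySem.Int.floordiv k 2 = k / 2 := PySem.Int.floordiv_eq_ediv_of_pos (by omega)
  rcases Int.emod_two_eq k with he | ho
  · -- k even, k = 2 * m
    obtain ⟨m, rfl⟩ : ∃ m, k = 2 * m := ⟨k / 2, by omega⟩
    rw [if_pos (show PySem.Int.mod (2 * m) 2 = 0 by rw [hmd]; omega)]
    have hm : PySem.Int.floordiv (2 * m) 2 = m := by rw [hfd]; omega
    rw [hm, razv_even m (by omega), razv_odd m (by omega)]
    by_cases h3 : 3 < m
    · rw [loop_eq m (2 * p + q) q h3]; ring
    · have : m = 2 ∨ m = 3 := by omega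
      rcases this with rfl | rfl
      · rw [razvAltLoop_stop2, razv_base 2 (by norm_num),
          show (2 : Int) + 1 = 3 by norm_num, razv_three]; ring
      · rw [razvAltLoop_stop3, razv_three, show (3 : Int) + 1 = 4 by norm_num, razv_four]; ring
  · -- k odd, k = 2 * m + 1
    obtain ⟨m, rfl⟩ : ∃ m, k = 2 * m + 1 := ⟨k / 2, by omega⟩
    rw [if_neg (show ¬ PySem.Int.mod (2 * m + 1) 2 = 0 by rw [hmd]; omega)]
    have hm : PySem.Int.floordiv (2 * m + 1) 2 = m := by rw [hfd]; omega
    rw [hm, razv_odd m (by omega),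
      show 2 * m + 1 + 1 = 2 * (m + 1) by ring, razv_even (m + 1) (by omega)]
    by_cases h3 : 3 < m
    · rw [loop_eq m p (p + 2 * q) h3]; ring
    · have : m = 2 ∨ m = 3 := by omega
      rcases this with rfl | rfl
      · rw [razvAltLoop_stop2, razv_base 2 (by norm_num),
          show (2 : Int) + 1 = 3 by norm_num, razv_three]; ring
      · rw [razvAltLoop_stop3, razv_three, show (3 : Int) + 1 = 4 by norm_num, razv_four]; ring
termination_by k.toNat
decreasing_by all_goals omega

-- ===== VERDICT (by name: the statement is the Claim_ definition above) =====
theorem razv_spec : Claim_equal_razv := by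
  intro n _
  unfold Spec_razv razv_alt
  by_cases h3 : n = 3
  · subst h3; rw [if_pos rfl, razv_three]
  · rw [if_neg h3]
    by_cases hlt : n < 3
    · rw [if_pos hlt, razv_base n hlt]
    · rw [if_neg hlt, loop_eq n 1 0 (by omega)]; ring
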